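-- pv_equiv track=rewrite | github.com/yeopee/Showmethemoney | show_me_the_money/lotto/parse_lotto.py | get_lotto_number_win_count
-- ===== SOURCE A (Python) =====
-- import collections
--
-- def get_lotto_number_win_count(total_numbers):
--     lotto_number_win = {}
--
--     for count, numbers in total_numbers.items():
--         for number in numbers['numbers']:
--             if lotto_number_win.get(number) == None:
--                 lotto_number_win[number] = []
--                 lotto_number_win[number].append(count)
--             else:
--                 lotto_number_win[number].append(count)
--
--     return collections.OrderedDict(sorted(lotto_number_win.items()))
-- ===== SOURCE B (Python) =====
-- import collections
--
-- def get_lotto_number_win_count(total_numbers):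
--     # flatten to (number, draw-key) pairs, then emit sorted distinct numbers,
--     # each with the counts selected from the flat list in encounter order
--     flat = [(x, count) for count, numbers in total_numbers.items()
--             for x in numbers['numbers']]
--     keys = sorted(set(x for x, _ in flat))
--     return collections.OrderedDict(
--         (n, [c for x, c in flat if x == n]) for n in keys)
-- ===== Notes on version B (the rewrite author's own statement) =====
-- stated objective: alternative
-- what changed: Replaces A's accumulator-dict-then-sort-items strategy with a stateless flatten / sorted-distinct-keys / per-key selection: build the flat (number, draw) list once, sort the distinct numbers, and emit each number with the counts filtered from the flat list.
import Mathlib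
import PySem

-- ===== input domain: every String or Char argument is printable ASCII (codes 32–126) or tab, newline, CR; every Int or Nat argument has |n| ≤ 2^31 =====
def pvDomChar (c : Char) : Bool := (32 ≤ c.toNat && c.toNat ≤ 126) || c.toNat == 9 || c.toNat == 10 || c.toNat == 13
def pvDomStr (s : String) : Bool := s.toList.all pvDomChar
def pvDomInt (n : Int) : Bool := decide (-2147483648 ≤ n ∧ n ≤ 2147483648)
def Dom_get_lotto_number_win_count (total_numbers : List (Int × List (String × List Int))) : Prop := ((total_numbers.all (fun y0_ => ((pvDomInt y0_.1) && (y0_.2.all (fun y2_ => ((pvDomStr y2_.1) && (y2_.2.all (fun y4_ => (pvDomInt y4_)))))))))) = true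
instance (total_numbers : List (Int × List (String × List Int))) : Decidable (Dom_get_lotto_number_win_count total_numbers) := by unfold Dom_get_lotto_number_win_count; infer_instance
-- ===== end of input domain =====

-- B replaces A's dict-accumulate-then-sort by flatten / sorted-distinct-keys / per-key selection
-- (no accumulator dict); objective: alternative decomposition, same exact result.

-- ===== PORT A =====
-- dict arguments arrive as association lists; PySem.Dict.ofList performs Python's
-- dict construction (duplicate keys overwrite, last value wins) before iteration.
-- numbers['numbers'] is ported as getD "numbers" []: exact whenever the key is
-- present, which Pre_ guarantees (Python raises KeyError otherwise).
-- sorted(lotto_number_win.items()) compares (key, value) tuples; keys are unique,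
-- so sorting by the key alone is the same order.
def get_lotto_number_win_count (total_numbers : List (Int × List (String × List Int))) : List (Int × List Int) :=
  let lw := (PySem.Dict.ofList total_numbers).items.foldl
    (fun (lw : PySem.Dict Int (List Int)) cn =>
      ((PySem.Dict.ofList cn.2).getD "numbers" []).foldl
        (fun lw number =>
          if lw.get? number = none then
            (lw.insert number []).modify number [] (· ++ [cn.1])
          else
            lw.modify number [] (· ++ [cn.1]))
        lw)
    PySem.Dict.empty
  PySem.List.sorted lw.items (fun p => p.1) false

-- ===== PORT B =====
def get_lotto_number_win_count_alt (total_numbers : List (Int × List (String × List Int))) : List (Int × List Int) :=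
  let flat := (PySem.Dict.ofList total_numbers).items.flatMap
    (fun cn => ((PySem.Dict.ofList cn.2).getD "numbers" []).map (fun x => (x, cn.1)))
  let keys := PySem.List.sorted (PySem.Set.ofList (flat.map (·.1))) (fun x => x) false
  keys.map (fun n => (n, (flat.filter (fun p => p.1 == n)).map (·.2)))

-- ===== PRECONDITION & SPEC =====
-- Pre_ excludes exactly the inputs where Python A raises KeyError: a value of the
-- (duplicate-collapsed) dict that has no 'numbers' key.
def Pre_get_lotto_number_win_count (total_numbers : List (Int × List (String × List Int))) : Prop :=
  ∀ p ∈ (PySem.Dict.ofList total_numbers).items, (PySem.Dict.ofList p.2).contains "numbers" = true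
instance (total_numbers : List (Int × List (String × List Int))) : Decidable (Pre_get_lotto_number_win_count total_numbers) := by unfold Pre_get_lotto_number_win_count; infer_instance
def pvWitness_get_lotto_number_win_count : (List (Int × List (String × List Int))) :=
  [(1, [("numbers", [3, 2])]), (2, [("numbers", [2])])]
def Spec_get_lotto_number_win_count (total_numbers : List (Int × List (String × List Int))) (out : List (Int × List Int)) : Prop := out = get_lotto_number_win_count_alt total_numbers
instance (total_numbers : List (Int × List (String × List Int))) (out : List (Int × List Int)) : Decidable (Spec_get_lotto_number_win_count total_numbers out) := by unfold Spec_get_lotto_number_win_count; infer_instance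

-- ===== CLAIM (what is proved, stated in full; the proofs are below) =====
def Claim_equal_get_lotto_number_win_count : Prop := ∀ (total_numbers : List (Int × List (String × List Int))), Dom_get_lotto_number_win_count total_numbers → Pre_get_lotto_number_win_count total_numbers → Spec_get_lotto_number_win_count total_numbers (get_lotto_number_win_count total_numbers)

-- ===== LEMMAS AND PROOFS =====

-- A's two branches are both d[k] = d.get(k, []) + [c], i.e. one modify.
theorem pv_step_eq (lw : PySem.Dict Int (List Int)) (n c : Int) :
    (if lw.get? n = none then
        (lw.insert n []).modify n [] (· ++ [c])
      else
        lw.modify n [] (· ++ [c])) = lw.modify n [] (· ++ [c]) := by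
  split_ifs with h
  · simp [PySem.Dict.modify, PySem.Dict.insert_insert_self,
      PySem.Dict.getD_insert_self, PySem.Dict.getD_of_get?_eq_none lw _ h]
  · rfl

-- sorting a nodup-keyed (key, value-of-key) list = mapping over the sorted keys
theorem pv_sorted_map (l : List Int) (hnd : l.Nodup) (g : Int → List Int) :
    PySem.List.sorted (l.map (fun k => (k, g k))) (fun p => p.1) false
      = (PySem.List.sorted l (fun x => x) false).map (fun k => (k, g k)) := by
  apply PySem.List.sorted_eq_of_perm_of_pairwise_lt
  · exact (PySem.List.sorted_perm l (fun x => x) false).map _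
  · have hp := PySem.List.sorted_pairwise l (fun x => x)
    have hnd' : (PySem.List.sorted l (fun x => x) false).Nodup :=
      (PySem.List.sorted_perm l (fun x => x) false).nodup_iff.mpr hnd
    have hlt : (PySem.List.sorted l (fun x => x) false).Pairwise (fun a b => a < b) :=
      (hp.and hnd').imp (fun h => lt_of_le_of_ne h.1 h.2)
    exact List.pairwise_map.mpr (hlt.imp (fun h => h))

-- ===== VERDICT (by name: the statement is the Claim_ definition above) =====
theorem get_lotto_number_win_count_spec : Claim_equal_get_lotto_number_win_count := by
  intro total_numbers _ _
  unfold Spec_get_lotto_number_win_count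
  unfold get_lotto_number_win_count get_lotto_number_win_count_alt
  simp only [pv_step_eq]
  set flat := (PySem.Dict.ofList total_numbers).items.flatMap
    (fun cn => ((PySem.Dict.ofList cn.2).getD "numbers" []).map (fun x => (x, cn.1))) with hflat
  have hfold : (PySem.Dict.ofList total_numbers).items.foldl
      (fun (lw : PySem.Dict Int (List Int)) cn =>
        ((PySem.Dict.ofList cn.2).getD "numbers" []).foldl
          (fun lw number => lw.modify number [] (· ++ [cn.1])) lw)
      PySem.Dict.empty
      = flat.foldl (fun lw p => lw.modify p.1 [] (· ++ [p.2])) PySem.Dict.empty := by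
    rw [hflat, List.foldl_flatMap]
    simp [List.foldl_map]
  rw [hfold]
  set lw := flat.foldl (fun (lw : PySem.Dict Int (List Int)) p => lw.modify p.1 [] (· ++ [p.2])) PySem.Dict.empty with hlw
  have hkeys : lw.keys = PySem.Set.ofList (flat.map (·.1)) := by
    rw [hlw, PySem.Dict.keys_foldl_modify_key flat (fun p => p.1) [] (fun _ p => (· ++ [p.2]))]
    simp [PySem.Set.update_nil_left]
  have hnd : lw.keys.Nodup := by
    rw [hlw]
    exact PySem.Dict.nodup_keys_foldl_modify_key flat (fun p => p.1) [] (fun _ p => (· ++ [p.2])) _ (by simp)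
  have hitems : lw.items = (PySem.Set.ofList (flat.map (·.1))).map
      (fun k => (k, (flat.filter (fun p => p.1 == k)).map (·.2))) := by
    rw [PySem.Dict.items_eq_map_keys lw hnd [], hkeys]
    apply List.map_congr_left
    intro k _
    rw [hlw, PySem.Dict.getD_foldl_modify_append]
    simp
  rw [hitems, pv_sorted_map _ (PySem.Set.nodup_ofList _)]
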